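-- pv_equiv track=rewrite | github.com/pypi-data/pypi-mirror-359 | packages/imio.email.parser/imio.email.parser-0.3.3-py3-none-any.whl/imio/email/parser/parser.py | strip_dq
-- ===== SOURCE A (Python) =====
-- def strip_dq(s):
--     """Remove the same number of starting and ending double quotes from a string."""
--     if not s:
--         return s
--     start_quotes = 0
--     while start_quotes < len(s) and s[start_quotes] == '"':
--         start_quotes += 1
--     end_quotes = 0
--     while end_quotes < len(s) - start_quotes and s[-(end_quotes + 1)] == '"':
--         end_quotes += 1
--     quotes_to_remove = min(start_quotes, end_quotes)
--     if quotes_to_remove > 0: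
--         return s[quotes_to_remove:-quotes_to_remove] if quotes_to_remove < len(s) else ""
--     return s
-- ===== SOURCE B (Python) =====
-- def strip_dq(s):
--     """Remove the same number of starting and ending double quotes from a string."""
--     if s.count('"') == len(s):
--         return s  # empty or made of quotes only: nothing strippable
--     if s[0] == '"' and s[-1] == '"':
--         return strip_dq(s[1:-1])
--     return s
-- ===== Notes on version B (the rewrite author's own statement) =====
-- stated objective: alternative
-- what changed: Replaces A's two counting while-loops plus a min-and-slice with a recursive peel: after an all-quotes base case, strip one quote from each end and recurse; no run counts or min are computed.
import Mathlib
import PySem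

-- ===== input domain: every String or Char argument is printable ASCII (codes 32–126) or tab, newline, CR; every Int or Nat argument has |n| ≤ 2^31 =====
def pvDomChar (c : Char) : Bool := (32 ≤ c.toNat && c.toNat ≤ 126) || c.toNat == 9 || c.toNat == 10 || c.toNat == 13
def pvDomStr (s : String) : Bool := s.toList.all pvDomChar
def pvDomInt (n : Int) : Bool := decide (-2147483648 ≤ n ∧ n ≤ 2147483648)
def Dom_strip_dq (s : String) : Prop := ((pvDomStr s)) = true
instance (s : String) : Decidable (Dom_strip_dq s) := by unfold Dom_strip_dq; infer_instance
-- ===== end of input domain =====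

-- B replaces A's two counting while-loops and min-and-slice with a recursive peel
-- (strip one quote from each end and recurse, after an all-quotes base case); same results, different algorithm.

-- ===== PORT A =====
-- while start_quotes < len(s) and s[start_quotes] == '"': start_quotes += 1
def pvAStart : List Char → Nat
  | [] => 0
  | c :: cs => if c == '"' then pvAStart cs + 1 else 0

-- while end_quotes < len(s) - start_quotes and s[-(end_quotes + 1)] == '"': end_quotes += 1
-- (walks the reversed string; the second argument is the bound len(s) - start_quotes)
def pvAEnd : List Char → Nat → Nat
  | _, 0 => 0
  | [], _ + 1 => 0
  | c :: cs, b + 1 => if c == '"' then pvAEnd cs b + 1 else 0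

def pvStripA (cs : List Char) : List Char :=
  if cs = [] then cs
  else
    let startQuotes := pvAStart cs
    let endQuotes := pvAEnd cs.reverse (cs.length - startQuotes)
    let quotesToRemove := min startQuotes endQuotes
    if quotesToRemove > 0 then
      if quotesToRemove < cs.length then
        PySem.List.slice cs (some (quotesToRemove : Int)) (some (-(quotesToRemove : Int)))
      else []
    else cs

def strip_dq (s : String) : String := String.ofList (pvStripA s.toList)

-- ===== PORT B =====
-- s.count('"') is PySem.Chars.count cs ['"']; this bridges it to List.count (single-character needle)
theorem pvCountQuote (cs : List Char) : PySem.Chars.count cs ['"'] = cs.count '"' := by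
  have go : ∀ (fuel : Nat) (l : List Char) (acc : Nat), l.length ≤ fuel →
      PySem.Chars.count.go ['"'] fuel l acc = acc + l.count '"' := by
    intro fuel
    induction fuel with
    | zero => intro l acc h; rw [Nat.le_zero, List.length_eq_zero_iff] at h; subst h
              simp [PySem.Chars.count.go]
    | succ f ih =>
      intro l acc h
      cases l with
      | nil => simp [PySem.Chars.count.go]
      | cons c t =>
        simp only [PySem.Chars.count.go]
        by_cases hc : c = '"'
        · subst hc
          simp only [List.isPrefixOf, BEq.rfl, Bool.and_true,
            if_true, List.length_singleton, List.drop_one, List.tail_cons]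
          rw [ih t (acc + 1) (by simpa using Nat.lt_succ_iff.mp (by simpa using h))]
          simp
          omega
        · have : (['"'].isPrefixOf (c :: t)) = false := by
            simp [List.isPrefixOf]; exact fun hcc => hc (by simpa using hcc.symm)
          rw [this]
          simp only [Bool.false_eq_true, if_false]
          rw [ih t acc (by simpa using Nat.lt_succ_iff.mp (by simpa using h))]
          simp [hc]
  simp only [PySem.Chars.count, List.isEmpty_cons, Bool.false_eq_true, if_false]
  rw [go cs.length cs 0 le_rfl, Nat.zero_add]

-- s[k:-k] for 0 < k ≤ len is take/drop (shared by both ports' slices)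
theorem pvSliceNeg (cs : List Char) (k : Nat) (hk : 0 < k) (hkn : k ≤ cs.length) :
    PySem.List.slice cs (some (k : Int)) (some (-(k : Int))) =
      List.take (cs.length - k - k) (List.drop k cs) := by
  simp only [PySem.List.slice, PySem.List.clampIdx_neg_natCast cs.length k hk,
    PySem.List.clampIdx_natCast, Nat.min_eq_left hkn]

-- the guards of B's recursion force length ≥ 2 (used for termination)
theorem pvPeelLen2 (cs : List Char)
    (h1 : ¬ PySem.Chars.count cs ['"'] = cs.length)
    (h2 : PySem.List.pyGet? cs 0 = some '"' ∧ PySem.List.pyGet? cs (-1) = some '"') :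
    2 ≤ cs.length := by
  match cs with
  | [] => simp [PySem.List.pyGet?, PySem.List.pyIdx?] at h2
  | [c] =>
    exfalso
    have hc : c = '"' := by
      simpa [PySem.List.pyGet?, PySem.List.pyIdx?] using h2.1
    subst hc
    exact h1 (by rw [pvCountQuote]; simp)
  | c :: d :: t => simp

theorem pvSliceLenLt (cs : List Char)
    (h1 : ¬ PySem.Chars.count cs ['"'] = cs.length)
    (h2 : PySem.List.pyGet? cs 0 = some '"' ∧ PySem.List.pyGet? cs (-1) = some '"') :
    (PySem.List.slice cs (some 1) (some (-1))).length < cs.length := by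
  have h := pvPeelLen2 cs h1 h2
  have e : PySem.List.slice cs (some 1) (some (-1)) =
      List.take (cs.length - 1 - 1) (List.drop 1 cs) := by
    have := pvSliceNeg cs 1 (by omega) (by omega)
    simpa using this
  rw [e]
  simp only [List.length_take, List.length_drop]
  omega

-- recursive peel: base case = all quotes; else strip one quote from each end and recurse
def pvPeelGo (cs : List Char) : List Char :=
  if h1 : PySem.Chars.count cs ['"'] = cs.length then cs
  else if h2 : PySem.List.pyGet? cs 0 = some '"' ∧ PySem.List.pyGet? cs (-1) = some '"' then
    pvPeelGo (PySem.List.slice cs (some 1) (some (-1)))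
  else cs
termination_by cs.length
decreasing_by exact pvSliceLenLt cs h1 h2

def strip_dq_alt (s : String) : String := String.ofList (pvPeelGo s.toList)

-- ===== PRECONDITION & SPEC =====
def Spec_strip_dq (s : String) (out : String) : Prop := out = strip_dq_alt s
instance (s : String) (out : String) : Decidable (Spec_strip_dq s out) := by unfold Spec_strip_dq; infer_instance

-- ===== CLAIM =====
def Claim_equal_strip_dq : Prop := ∀ (s : String), Dom_strip_dq s → Spec_strip_dq s (strip_dq s)

-- ===== LEMMAS AND PROOFS =====

-- every string splits as quotes ++ core ++ quotes with a quote-free-ended, nonempty core (or is all quotes)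
theorem pvDecomp (cs : List Char) :
    cs = List.replicate cs.length '"' ∨
    ∃ a core b, cs = List.replicate a '"' ++ core ++ List.replicate b '"' ∧
      core ≠ [] ∧ core.head? ≠ some '"' ∧ core.getLast? ≠ some '"' := by
  by_cases hall : ∀ c ∈ cs, c = '"'
  · left
    exact List.eq_replicate_iff.mpr ⟨rfl, fun c hc => hall c hc⟩
  · right
    set p : Char → Bool := (· == '"') with hp
    set t := cs.dropWhile p with ht
    have hdw : ∀ (l : List Char) (c : Char), (l.dropWhile p).head? = some c → c ≠ '"' := by
      intro l c h
      have hne : l.dropWhile p ≠ [] := by intro e; rw [e] at h; simp at h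
      have h2 := List.head_dropWhile_not p hne
      rw [List.head?_eq_some_head hne, Option.some.injEq] at h
      rw [h] at h2
      simpa [hp] using h2
    have htne : t ≠ [] := by
      intro e
      apply hall
      intro c hc
      have hsplit := List.takeWhile_append_dropWhile (p := p) (l := cs)
      rw [← ht, e, List.append_nil] at hsplit
      rw [← hsplit] at hc
      simpa [hp] using List.mem_takeWhile_imp hc
    have hth : t.head? ≠ some '"' := by
      cases h : t.head? with
      | none => simp
      | some c => simpa using fun e => (hdw cs c (ht ▸ h)) (by simpa using e)
    set u := (t.reverse.dropWhile p).reverse with hu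
    set blen := (t.reverse.takeWhile p).length with hb
    have hrw : t.reverse = List.replicate blen '"' ++ u.reverse := by
      conv_lhs => rw [← List.takeWhile_append_dropWhile (p := p) (l := t.reverse)]
      congr 1
      · exact List.eq_replicate_iff.mpr ⟨rfl, fun c hc => by simpa [hp] using List.mem_takeWhile_imp hc⟩
      · rw [hu, List.reverse_reverse]
    have htu : t = u ++ List.replicate blen '"' := by
      have := congrArg List.reverse hrw
      simpa using this
    have hune : u ≠ [] := by
      intro e
      rw [e, List.nil_append] at htu
      cases hn : blen with
      | zero => rw [hn] at htu; simp at htu; exact htne htu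
      | succ m => rw [hn, List.replicate_succ] at htu; rw [htu] at hth; simp at hth
    refine ⟨(cs.takeWhile p).length, u, blen, ?_, hune, ?_, ?_⟩
    · conv_lhs => rw [← List.takeWhile_append_dropWhile (p := p) (l := cs)]
      rw [← ht, htu, List.append_assoc]
      congr 1
      exact List.eq_replicate_iff.mpr ⟨rfl, fun c hc => by simpa [hp] using List.mem_takeWhile_imp hc⟩
    · rw [htu] at hth
      rwa [List.head?_append_of_ne_nil u hune] at hth
    · rw [show u.getLast? = u.reverse.head? from List.getLast?_eq_head?_reverse, hu]
      simp only [List.reverse_reverse]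
      cases h : (t.reverse.dropWhile p).head? with
      | none => simp
      | some c => simpa using fun e => (hdw t.reverse c h) (by simpa using e)

theorem pvAStart_replicate (n : Nat) : pvAStart (List.replicate n '"') = n := by
  induction n with
  | zero => rfl
  | succ m ih => simp [List.replicate_succ, pvAStart, ih]

theorem pvAStart_append_replicate (l : List Char) (a : Nat) :
    pvAStart (List.replicate a '"' ++ l) = a + pvAStart l := by
  induction a with
  | zero => simp
  | succ m ih => simp [List.replicate_succ, pvAStart, ih]; omega

theorem pvAStart_head_ne (l : List Char) (h : l.head? ≠ some '"') : pvAStart l = 0 := by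
  cases l with
  | nil => rfl
  | cons c t =>
    simp only [List.head?_cons, ne_eq, Option.some.injEq] at h
    simp [pvAStart, h]

theorem pvAEnd_eq (l : List Char) (b : Nat) : pvAEnd l b = min (pvAStart l) b := by
  induction l generalizing b with
  | nil => cases b <;> simp [pvAEnd, pvAStart]
  | cons c cs ih =>
    cases b with
    | zero => simp [pvAEnd]
    | succ b =>
      by_cases h : c == '"'
      · simp [pvAEnd, pvAStart, h, ih]
      · simp [pvAEnd, pvAStart, h]

theorem pvGet0 (l : List Char) : PySem.List.pyGet? l 0 = l.head? := by
  cases l <;> simp [PySem.List.pyGet?, PySem.List.pyIdx?]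

theorem pvGetNeg1 (l : List Char) : PySem.List.pyGet? l (-1) = l.getLast? := by
  cases h : l.length with
  | zero => rw [List.length_eq_zero_iff] at h; subst h; rfl
  | succ m => simp [PySem.List.pyGet?, PySem.List.pyIdx?, h, List.getLast?_eq_getElem?]

-- a string whose core has a non-quote head is not all quotes
theorem pvCountNe (a b : Nat) (core : List Char) (hne : core ≠ [])
    (hh : core.head? ≠ some '"') :
    ¬ PySem.Chars.count (List.replicate a '"' ++ core ++ List.replicate b '"') ['"'] =
      (List.replicate a '"' ++ core ++ List.replicate b '"').length := by
  rw [pvCountQuote]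
  simp only [List.count_append, List.count_replicate_self, List.length_append,
    List.length_replicate]
  have hlt : core.count '"' < core.length := by
    rcases Nat.lt_or_ge (core.count '"') core.length with h | h
    · exact h
    · exfalso
      have he : core.count '"' = core.length := le_antisymm (List.count_le_length) h
      have hall := List.count_eq_length.mp he
      cases core with
      | nil => exact hne rfl
      | cons c t =>
        exact hh (by rw [List.head?_cons, (hall c (List.mem_cons_self)).symm])
  omega

-- the middle slice s[1:-1] on the canonical form with both runs nonempty
theorem pvSliceCanon (a b : Nat) (core : List Char) :
    PySem.List.slice
      (List.replicate (a+1) '"' ++ core ++ List.replicate (b+1) '"') (some 1) (some (-1)) =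
      List.replicate a '"' ++ core ++ List.replicate b '"' := by
  have hlen : (List.replicate (a+1) '"' ++ core ++ List.replicate (b+1) '"').length
      = a + 1 + core.length + (b + 1) := by simp [List.length_append]; omega
  have h1 := pvSliceNeg (List.replicate (a+1) '"' ++ core ++ List.replicate (b+1) '"') 1
      (by omega) (by rw [hlen]; omega)
  rw [show ((1:Nat):Int) = (1:Int) by norm_num] at h1
  rw [h1, hlen]
  rw [show List.replicate (a+1) '"' = '"' :: List.replicate a '"' from List.replicate_succ ..]
  simp only [List.cons_append, List.drop_succ_cons, List.drop_zero]
  rw [show a + 1 + core.length + (b + 1) - 1 - 1 = (List.replicate a '"' ++ core).length + b by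
    simp; omega]
  rw [List.take_length_add_append, List.take_replicate]
  simp

-- B on the canonical form: peels min a b pairs
theorem pvPeelGo_canon (a b : Nat) (core : List Char) (hne : core ≠ [])
    (hh : core.head? ≠ some '"') (hl : core.getLast? ≠ some '"') :
    pvPeelGo (List.replicate a '"' ++ core ++ List.replicate b '"') =
      List.replicate (a - min a b) '"' ++ core ++ List.replicate (b - min a b) '"' := by
  induction a generalizing b with
  | zero =>
    rw [pvPeelGo, dif_neg (pvCountNe 0 b core hne hh), dif_neg]
    · simp
    · rw [pvGet0]
      simp only [List.replicate_zero, List.nil_append]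
      rw [List.head?_append_of_ne_nil core hne]
      exact fun hc => hh hc.1
  | succ a' ih =>
    cases b with
    | zero =>
      rw [pvPeelGo, dif_neg (pvCountNe (a'+1) 0 core hne hh), dif_neg]
      · simp
      · rw [pvGetNeg1]
        simp only [List.replicate_zero, List.append_nil]
        rw [List.getLast?_append_of_ne_nil _ hne]
        exact fun hc => hl hc.2
    | succ b' =>
      rw [pvPeelGo, dif_neg (pvCountNe (a'+1) (b'+1) core hne hh), dif_pos, pvSliceCanon,
        ih b']
      · have h1 : a' + 1 - min (a'+1) (b'+1) = a' - min a' b' := by omega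
        have h2 : b' + 1 - min (a'+1) (b'+1) = b' - min a' b' := by omega
        rw [h1, h2]
      · constructor
        · rw [pvGet0, List.replicate_succ]
          simp
        · rw [pvGetNeg1, List.getLast?_append_of_ne_nil _ (by simp [List.replicate_succ])]
          simp [List.getLast?_replicate]

-- A on the canonical form
theorem pvStripA_canon (a b : Nat) (core : List Char) (hne : core ≠ [])
    (hh : core.head? ≠ some '"') (hl : core.getLast? ≠ some '"') :
    pvStripA (List.replicate a '"' ++ core ++ List.replicate b '"') =
      List.replicate (a - min a b) '"' ++ core ++ List.replicate (b - min a b) '"' := by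
  set cs := List.replicate a '"' ++ core ++ List.replicate b '"' with hcs
  have hclen : 1 ≤ core.length := by
    cases core with | nil => exact absurd rfl hne | cons c t => simp
  have hlen : cs.length = a + core.length + b := by simp [hcs]; omega
  have hstart : pvAStart cs = a := by
    rw [hcs, List.append_assoc, pvAStart_append_replicate]
    rw [pvAStart_head_ne (core ++ List.replicate b '"')
      (by rwa [List.head?_append_of_ne_nil core hne])]
    omega
  have hrev : cs.reverse = List.replicate b '"' ++ core.reverse ++ List.replicate a '"' := by
    simp [hcs, List.reverse_append, List.append_assoc]
  have hrstart : pvAStart cs.reverse = b := by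
    rw [hrev, List.append_assoc, pvAStart_append_replicate]
    rw [pvAStart_head_ne (core.reverse ++ List.replicate a '"')]
    · omega
    · rw [List.head?_append_of_ne_nil core.reverse (by simpa using hne)]
      rwa [← List.getLast?_eq_head?_reverse]
  have hend : pvAEnd cs.reverse (cs.length - a) = b := by
    rw [pvAEnd_eq, hrstart, hlen]
    omega
  have hne' : cs ≠ [] := by
    rw [hcs]; intro e
    apply hne
    rcases List.append_eq_nil_iff.mp (List.append_eq_nil_iff.mp e).1 with ⟨_, h2⟩
    exact h2
  rw [pvStripA, if_neg hne']
  simp only [hstart, hend]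
  by_cases hk : min a b > 0
  · rw [if_pos hk, if_pos (by rw [hlen]; omega)]
    rw [pvSliceNeg cs (min a b) hk (by rw [hlen]; omega)]
    rw [hlen, hcs]
    have hdrop : List.drop (min a b) (List.replicate a '"' ++ core ++ List.replicate b '"')
        = List.replicate (a - min a b) '"' ++ core ++ List.replicate b '"' := by
      have hsplit : List.replicate a '"' = List.replicate (min a b) '"' ++ List.replicate (a - min a b) '"' := by
        rw [← List.replicate_add]; congr 1; omega
      rw [hsplit, List.append_assoc, List.append_assoc, List.drop_left' (by simp),
        ← List.append_assoc]
    rw [hdrop]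
    rw [show a + core.length + b - min a b - min a b
        = (List.replicate (a - min a b) '"' ++ core).length + (b - min a b) by simp; omega]
    rw [List.take_length_add_append, List.take_replicate]
    congr 2
    omega
  · rw [if_neg hk]
    have : min a b = 0 := by omega
    rw [hcs, this]
    simp

theorem pvMain (cs : List Char) : pvStripA cs = pvPeelGo cs := by
  rcases pvDecomp cs with h | ⟨a, core, b, h, hne, hh, hl⟩
  · -- all quotes
    rw [h]
    generalize cs.length = n
    rw [pvPeelGo]
    rw [dif_pos (by rw [pvCountQuote]; simp)]
    cases n with
    | zero => rfl
    | succ m =>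
      rw [pvStripA, if_neg (by simp [List.replicate_succ])]
      simp only [pvAStart_replicate, List.length_replicate, Nat.sub_self,
        List.reverse_replicate]
      simp [pvAEnd]
  · rw [h, pvStripA_canon a b core hne hh hl, pvPeelGo_canon a b core hne hh hl]

-- ===== VERDICT =====
theorem strip_dq_spec : Claim_equal_strip_dq := by
  intro s _
  unfold Spec_strip_dq strip_dq strip_dq_alt
  rw [pvMain]
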